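-- pv_equiv track=rewrite | github.com/antoinewdg/pyffs | pyffs/automaton_generation/utils.py | generate_all_bit_vectors_under_n
-- ===== SOURCE A (Python) =====
-- def generate_all_bit_vectors_under_n(n):
--     newly_generated = [()]
--     result = []
--     for i in range(n + 1):
--         result.extend(newly_generated)
--         if i >= n:
--             break
--         old = newly_generated
--         newly_generated = []
--         for bit_vector in old:
--             newly_generated.append(bit_vector + (0,))
--             newly_generated.append(bit_vector + (1,))
--
--     return result
-- ===== SOURCE B (Python) =====
-- import itertools
--
--
-- def generate_all_bit_vectors_under_n(n):
--     result = []
--     for length in range(n + 1):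
--         result.extend(itertools.product((0, 1), repeat=length))
--     return result
-- ===== Notes on version B (the rewrite author's own statement) =====
-- stated objective: idiomatic
-- what changed: A grows each level by extending the previously generated level's tuples (a DP-style incremental build); B keeps no previous level and regenerates each length directly with itertools.product((0,1), repeat=length).
import Mathlib
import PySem

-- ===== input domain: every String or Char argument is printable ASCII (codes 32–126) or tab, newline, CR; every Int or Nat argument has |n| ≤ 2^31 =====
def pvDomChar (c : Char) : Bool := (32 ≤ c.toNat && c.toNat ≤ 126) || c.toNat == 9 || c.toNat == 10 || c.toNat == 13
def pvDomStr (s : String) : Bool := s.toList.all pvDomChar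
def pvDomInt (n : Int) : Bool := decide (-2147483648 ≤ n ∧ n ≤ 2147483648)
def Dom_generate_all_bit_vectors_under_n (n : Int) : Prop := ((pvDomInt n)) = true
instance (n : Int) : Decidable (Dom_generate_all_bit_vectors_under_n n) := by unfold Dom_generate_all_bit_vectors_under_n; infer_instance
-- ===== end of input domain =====

-- B replaces A's incremental build (each level obtained by extending the previous level's
-- tuples) with an independent per-length generation via itertools.product; same output.

-- ===== PORT A =====
-- inner 'for bit_vector in old: append(bv+(0,)); append(bv+(1,))' as a foldl of appends
def pvAStep (old : List (List Int)) : List (List Int) :=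
  old.foldl (fun ng v => ng ++ [v ++ [0], v ++ [1]]) []

-- the 'for i in range(n+1)' loop with its 'break' when i >= n, over the remaining range
def pvALoop (n : Int) : List Int → List (List Int) → List (List Int) → List (List Int)
  | [], _, result => result
  | i :: rest, newly, result =>
    let result := result ++ newly
    if i ≥ n then result
    else pvALoop n rest (pvAStep newly) result

def generate_all_bit_vectors_under_n (n : Int) : List (List Int) :=
  pvALoop n (PySem.List.pyRange 0 (n + 1) 1) [[]] []

-- ===== PORT B =====
-- itertools.product((0,1), repeat=k): lexicographic, first coordinate varies slowest
def pvProdRep : Nat → List (List Int)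
  | 0 => [[]]
  | k + 1 => ([0, 1] : List Int).flatMap (fun b => (pvProdRep k).map (fun v => b :: v))

def generate_all_bit_vectors_under_n_alt (n : Int) : List (List Int) :=
  (PySem.List.pyRange 0 (n + 1) 1).flatMap (fun L => pvProdRep L.toNat)

-- ===== PRECONDITION & SPEC =====
def Spec_generate_all_bit_vectors_under_n (n : Int) (out : List (List Int)) : Prop := out = generate_all_bit_vectors_under_n_alt n
instance (n : Int) (out : List (List Int)) : Decidable (Spec_generate_all_bit_vectors_under_n n out) := by unfold Spec_generate_all_bit_vectors_under_n; infer_instance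

-- ===== CLAIM (what is proved, stated in full; the proofs are below) =====
def Claim_equal_generate_all_bit_vectors_under_n : Prop := ∀ (n : Int), Dom_generate_all_bit_vectors_under_n n → Spec_generate_all_bit_vectors_under_n n (generate_all_bit_vectors_under_n n)

-- ===== LEMMAS AND PROOFS =====

-- A's inner loop of two appends is flatMap of the two extensions
theorem pvAStep_eq_flatMap (old : List (List Int)) :
    pvAStep old = old.flatMap (fun v => [v ++ [0], v ++ [1]]) := by
  unfold pvAStep
  rw [PySem.List.foldl_append_eq_flatMap]
  simp

-- appending a bit at the end commutes with prepending a bit at the front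
theorem pvStep_comm (xs : List (List Int)) :
    pvAStep (([0, 1] : List Int).flatMap (fun b => xs.map (fun v => b :: v)))
      = ([0, 1] : List Int).flatMap (fun b => (pvAStep xs).map (fun v => b :: v)) := by
  simp [pvAStep_eq_flatMap, List.flatMap_append, List.flatMap_map, List.map_flatMap]

-- one A-step on level k gives level k+1
theorem pvAStep_prodRep (k : Nat) : pvAStep (pvProdRep k) = pvProdRep (k + 1) := by
  induction k with
  | zero => decide
  | succ k ih =>
    show pvAStep (pvProdRep (k + 1)) = pvProdRep (k + 2)
    rw [show pvProdRep (k + 1)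
          = ([0, 1] : List Int).flatMap (fun b => (pvProdRep k).map (fun v => b :: v)) from rfl,
        pvStep_comm, ih]
    rfl

-- iterated A-step from the seed level
def pvIter : Nat → List (List Int) → List (List Int)
  | 0, xs => xs
  | t + 1, xs => pvIter t (pvAStep xs)

theorem pvIter_prodRep (t k : Nat) : pvIter t (pvProdRep k) = pvProdRep (k + t) := by
  induction t generalizing k with
  | zero => rfl
  | succ t ih => simp [pvIter, pvAStep_prodRep, ih, Nat.add_comm, Nat.add_left_comm]

-- the main loop invariant: running A's loop over range(i, n+1) with i + j = n
theorem pvALoop_eq (n : Int) (j : Nat) (i : Int) (hij : i + j = n)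
    (newly acc : List (List Int)) :
    pvALoop n (PySem.List.pyRange i (n + 1) 1) newly acc
      = acc ++ (List.range (j + 1)).flatMap (fun t => pvIter t newly) := by
  induction j generalizing i newly acc with
  | zero =>
    have hi : i = n := by omega
    subst hi
    rw [PySem.List.pyRange_one_cons (by omega), PySem.List.pyRange_one_eq_nil (by omega)]
    simp [pvALoop, List.range_succ, pvIter]
  | succ j ih =>
    rw [PySem.List.pyRange_one_cons (by omega)]
    simp only [pvALoop, if_neg (by omega : ¬ i ≥ n)]
    rw [ih (i + 1) (by omega)]
    conv_rhs => rw [List.range_succ_eq_map]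
    simp only [List.flatMap_cons, List.flatMap_map, pvIter, List.append_assoc]

theorem ports_agree (n : Int) :
    generate_all_bit_vectors_under_n n = generate_all_bit_vectors_under_n_alt n := by
  unfold generate_all_bit_vectors_under_n generate_all_bit_vectors_under_n_alt
  rcases le_or_gt n (-1) with h | h
  · rw [PySem.List.pyRange_one_eq_nil (by omega)]
    rfl
  · have h0 : (0 : Int) ≤ n := by omega
    rw [pvALoop_eq n n.toNat 0 (by omega) [[]] []]
    rw [PySem.List.pyRange_one (0) (n + 1)]
    have hlen : (n + 1 - 0).toNat = n.toNat + 1 := by omega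
    rw [hlen, List.flatMap_map]
    simp only [List.nil_append]
    have hfun : (fun t : Nat => pvIter t [[]])
        = fun t : Nat => pvProdRep ((0 + (t : Int)).toNat) := by
      funext t
      have h := pvIter_prodRep t 0
      simp only [pvProdRep, Nat.zero_add] at h
      rw [h]
      congr 1
      omega
    rw [hfun]

-- ===== VERDICT (by name: the statement is the Claim_ definition above) =====
theorem generate_all_bit_vectors_under_n_spec : Claim_equal_generate_all_bit_vectors_under_n := by
  intro n _
  unfold Spec_generate_all_bit_vectors_under_n
  exact ports_agree n
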